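-- pv_equiv track=rewrite | github.com/0wuxinyun/CS221 | Week1/foundations-2/submission.py | findSingletonWords
-- ===== SOURCE A (Python) =====
-- import collections
--
-- def findSingletonWords(text):
--     """
--     Splits the string |text| by whitespace and returns the set of words that
--     occur exactly once.
--     You might find it useful to use collections.defaultdict(int).
--     """
--     # BEGIN_YOUR_CODE (our solution is 4 lines of code, but don't worry if you deviate from this)
--     d=collections.defaultdict(int)
--     for i in text.split(" "):
--         d[i]+=1
--     result=[]
--     for k,v in d.items():
--         if v==1:
--             result.append(k)
--     return set(result)
-- ===== SOURCE B (Python) =====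
-- def findSingletonWords(text):
--     once = set()
--     many = set()
--     for w in text.split(" "):
--         if w in many:
--             pass
--         elif w in once:
--             once.discard(w)
--             many.add(w)
--         else:
--             once.add(w)
--     return once
-- ===== Notes on version B (the rewrite author's own statement) =====
-- stated objective: alternative
-- what changed: Replaces the count-dict plus second filtering pass over dict items by a single pass that maintains two sets, `once` and `many`, moving a word from `once` to `many` on its second occurrence and returning `once` directly.
import Mathlib
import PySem

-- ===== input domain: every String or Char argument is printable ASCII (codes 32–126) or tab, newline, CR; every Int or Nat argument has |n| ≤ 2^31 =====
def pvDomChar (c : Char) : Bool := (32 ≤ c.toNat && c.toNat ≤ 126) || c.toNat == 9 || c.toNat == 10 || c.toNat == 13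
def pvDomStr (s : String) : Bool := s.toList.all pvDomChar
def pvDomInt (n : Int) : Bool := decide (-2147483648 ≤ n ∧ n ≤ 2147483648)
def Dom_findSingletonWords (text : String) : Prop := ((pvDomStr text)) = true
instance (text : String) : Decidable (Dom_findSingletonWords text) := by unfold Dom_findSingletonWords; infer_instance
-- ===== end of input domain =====

-- B replaces A's count-dict plus second pass over the dict items by a single pass keeping two
-- sets (`once`, `many`) and returning `once`; objective: alternative (same cost, different algorithm).

-- ===== PORT A =====
def findSingletonWords (text : String) : List String :=
  let d : PySem.Dict String Int := ((PySem.Str.split? text " ").getD []).foldl (fun d i => d.modify i 0 (· + 1)) PySem.Dict.empty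
  let result := d.items.foldl (fun acc kv => if kv.2 == (1 : Int) then acc ++ [kv.1] else acc) ([] : List String)
  PySem.Set.ofList result

-- ===== PORT B =====
def fswStep (s : PySem.Set String × PySem.Set String) (w : String) :
    PySem.Set String × PySem.Set String :=
  if s.2.contains w then s
  else if s.1.contains w then (s.1.discard w, s.2.add w)
  else (s.1.add w, s.2)

def findSingletonWords_alt (text : String) : List String :=
  (((PySem.Str.split? text " ").getD []).foldl fswStep (PySem.Set.empty, PySem.Set.empty)).1

-- ===== PRECONDITION & SPEC =====
def Spec_findSingletonWords (text : String) (out : List String) : Prop := out = findSingletonWords_alt text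
instance (text : String) (out : List String) : Decidable (Spec_findSingletonWords text out) := by unfold Spec_findSingletonWords; infer_instance

-- ===== CLAIM (what is proved, stated in full; the proofs are below) =====
def Claim_equal_findSingletonWords : Prop := ∀ (text : String), Dom_findSingletonWords text → Spec_findSingletonWords text (findSingletonWords text)

-- ===== LEMMAS AND PROOFS =====

/-- the common value of both ports: first occurrences, kept iff the total count is 1 -/
def fswSpecList (l : List String) : List String :=
  (PySem.Set.ofList l).filter (fun k => List.count k l == 1)

lemma foldl_add_nodup (l acc : List String) (h : (acc ++ l).Nodup) :
    l.foldl PySem.Set.add acc = acc ++ l := by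
  induction l generalizing acc with
  | nil => simp
  | cons x t ih =>
    have hx : x ∉ acc := by
      intro hmem
      exact (List.disjoint_of_nodup_append h) hmem List.mem_cons_self
    rw [List.foldl_cons, PySem.Set.add_of_not_mem hx, ih (acc ++ [x]) (by simpa using h)]
    simp

lemma ofList_nodup_self (l : List String) (h : l.Nodup) : PySem.Set.ofList l = l := by
  rw [PySem.Set.ofList_eq_foldl]
  simpa using foldl_add_nodup l [] (by simpa using h)

lemma ofList_append_singleton (l : List String) (x : String) :
    PySem.Set.ofList (l ++ [x]) = (PySem.Set.ofList l).add x := by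
  rw [PySem.Set.ofList_eq_foldl, PySem.Set.ofList_eq_foldl, List.foldl_append, List.foldl_cons,
    List.foldl_nil]

lemma portA_eq (l : List String) :
    PySem.Set.ofList
      ((l.foldl (fun d i => d.modify i 0 (· + 1)) PySem.Dict.empty).items.foldl
        (fun acc kv => if kv.2 == (1 : Int) then acc ++ [kv.1] else acc) ([] : List String))
      = fswSpecList l := by
  rw [← PySem.Dict.counter_eq_foldl, PySem.Dict.items_counter, List.foldl_map]
  have hfold :
      List.foldl (fun acc k => if ((List.count k l : Int) == 1) then acc ++ [k] else acc)
        ([] : List String) (PySem.Set.ofList l) =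
      [] ++ ((PySem.Set.ofList l).filter (fun k => ((List.count k l : Int) == 1))).map id :=
    PySem.List.foldl_append_if (fun k => ((List.count k l : Int) == 1)) id (PySem.Set.ofList l) []
  simp only [List.map_id, List.nil_append] at hfold
  rw [hfold]
  have hcong : (PySem.Set.ofList l).filter (fun k => ((List.count k l : Int) == 1))
      = (PySem.Set.ofList l).filter (fun k => List.count k l == 1) := by
    apply List.filter_congr
    intro k _
    rw [Bool.eq_iff_iff]
    simp [beq_iff_eq]
  rw [hcong, ofList_nodup_self _ ((PySem.Set.nodup_ofList l).filter _)]
  rfl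

lemma portB_inv (l : List String) :
    (l.foldl fswStep (PySem.Set.empty, PySem.Set.empty)).1 = fswSpecList l ∧
    (∀ w, w ∈ (l.foldl fswStep (PySem.Set.empty, PySem.Set.empty)).2 ↔ 2 ≤ List.count w l) := by
  induction l using List.reverseRecOn with
  | nil =>
    refine ⟨rfl, fun w => ?_⟩
    simp [PySem.Set.empty]
  | append_singleton l x ih =>
    obtain ⟨h1, h2⟩ := ih
    rw [List.foldl_append, List.foldl_cons, List.foldl_nil]
    generalize hG : List.foldl fswStep (PySem.Set.empty, PySem.Set.empty) l = s at h1 h2 ⊢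
    have memOnce : ∀ w, w ∈ s.1 ↔ (w ∈ l ∧ List.count w l = 1) := by
      intro w
      rw [h1]
      simp [fswSpecList, List.mem_filter, PySem.Set.mem_ofList]
    have hcontains1 : (s.1.contains x = true) ↔ x ∈ s.1 := by
      simp [PySem.Set.contains]
    have hcontains2 : (s.2.contains x = true) ↔ x ∈ s.2 := by
      simp [PySem.Set.contains]
    by_cases hm : x ∈ s.2
    · -- x already seen at least twice: state unchanged
      have hcx : 2 ≤ List.count x l := (h2 x).1 hm
      have hxl : x ∈ l := List.count_pos_iff.1 (by omega)
      rw [fswStep, if_pos (hcontains2.2 hm)]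
      constructor
      · rw [h1]
        unfold fswSpecList
        rw [ofList_append_singleton, PySem.Set.add_of_mem ((PySem.Set.mem_ofList l x).2 hxl)]
        apply List.filter_congr
        intro k hk
        rw [Bool.eq_iff_iff]
        by_cases hkx : k = x
        · simp [hkx, List.count_append]
          omega
        · simp [List.count_append, beq_iff_eq, Ne.symm hkx]
      · intro w
        rw [h2 w, List.count_append, List.count_singleton]
        by_cases hwx : x = w
        · subst hwx
          simp only [beq_self_eq_true, if_true]
          omega
        · simp [hwx]
    · by_cases ho : x ∈ s.1
      · -- second occurrence: move x from once to many
        have hcx : List.count x l = 1 := ((memOnce x).1 ho).2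
        have hxl : x ∈ l := ((memOnce x).1 ho).1
        rw [fswStep, if_neg (fun h => hm (hcontains2.1 h)), if_pos (hcontains1.2 ho)]
        constructor
        · show s.1.discard x = fswSpecList (l ++ [x])
          rw [h1]
          unfold fswSpecList PySem.Set.discard
          rw [List.filter_filter, ofList_append_singleton,
            PySem.Set.add_of_mem ((PySem.Set.mem_ofList l x).2 hxl)]
          apply (List.filter_congr _).symm
          intro k hk
          rw [Bool.eq_iff_iff]
          by_cases hkx : k = x
          · subst hkx
            simp [List.count_append, hcx]
          · simp [List.count_append, beq_iff_eq, Ne.symm hkx, hkx]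
        · intro w
          show w ∈ s.2.add x ↔ _
          rw [PySem.Set.mem_add, h2 w, List.count_append, List.count_singleton]
          by_cases hwx : x = w
          · subst hwx; simp [hcx]
          · have hwx' : w ≠ x := fun h => hwx h.symm
            simp [hwx, hwx']
      · -- first occurrence: add x to once
        have hxl : x ∉ l := by
          intro hmem
          have hc1 : 1 ≤ List.count x l := List.count_pos_iff.2 hmem
          rcases Nat.lt_or_ge (List.count x l) 2 with hlt | hge
          · exact ho ((memOnce x).2 ⟨hmem, by omega⟩)
          · exact hm ((h2 x).2 hge)
        have hc0 : List.count x l = 0 := List.count_eq_zero.2 hxl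
        rw [fswStep, if_neg (fun h => hm (hcontains2.1 h)), if_neg (fun h => ho (hcontains1.1 h))]
        constructor
        · show s.1.add x = fswSpecList (l ++ [x])
          rw [PySem.Set.add_of_not_mem ho, h1]
          unfold fswSpecList
          rw [ofList_append_singleton,
            PySem.Set.add_of_not_mem (fun h => hxl ((PySem.Set.mem_ofList l x).1 h)),
            List.filter_append]
          congr 1
          · apply (List.filter_congr _).symm
            intro k hk
            have hkx : k ≠ x := fun h => hxl ((PySem.Set.mem_ofList l x).1 (h ▸ hk))
            rw [Bool.eq_iff_iff]
            simp [List.count_append, beq_iff_eq, Ne.symm hkx]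
          · simp [List.count_append, hc0]
        · intro w
          rw [h2 w, List.count_append, List.count_singleton]
          by_cases hwx : x = w
          · subst hwx
            simp only [hc0, Nat.zero_add, beq_self_eq_true, if_true]
            omega
          · simp [hwx]

-- ===== VERDICT (by name: the statement is the Claim_ definition above) =====
theorem findSingletonWords_spec : Claim_equal_findSingletonWords := by
  intro text _
  unfold Spec_findSingletonWords findSingletonWords findSingletonWords_alt
  rw [portA_eq]
  exact ((portB_inv _).1).symm
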